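-- pv_equiv track=rewrite | github.com/gimdongwon/Catch_python_tmi | Dongwon/programers/monthly_code2/makeZero.py | solution
-- ===== SOURCE A (Python) =====
-- def solution(a, edges):
--     if sum(a) != 0:
--         return -1
--     result = -1
--     visited = [False] * len(a)
--     for i in range(len(a)):
--         while a[i]!= 0 and visited[i] == False:
--             if a[i] > 0:
--                 a[i] -= 1
--             else:
--                 a[i] += 1
--             result += 1
--         visited[i] = True
--     return result
-- ===== SOURCE B (Python) =====
-- def solution(a, edges):
--     return sum(abs(x) for x in a) - 1 if sum(a) == 0 else -1
-- ===== Notes on version B (the rewrite author's own statement) =====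
-- stated objective: simpler
-- what changed: Replaces the unit-step decrement loops with the one-line closed form sum(abs(x) for x in a) - 1 guarded by sum(a) == 0; B also does not mutate the input list a, which A zeroes in place.
import Mathlib
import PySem

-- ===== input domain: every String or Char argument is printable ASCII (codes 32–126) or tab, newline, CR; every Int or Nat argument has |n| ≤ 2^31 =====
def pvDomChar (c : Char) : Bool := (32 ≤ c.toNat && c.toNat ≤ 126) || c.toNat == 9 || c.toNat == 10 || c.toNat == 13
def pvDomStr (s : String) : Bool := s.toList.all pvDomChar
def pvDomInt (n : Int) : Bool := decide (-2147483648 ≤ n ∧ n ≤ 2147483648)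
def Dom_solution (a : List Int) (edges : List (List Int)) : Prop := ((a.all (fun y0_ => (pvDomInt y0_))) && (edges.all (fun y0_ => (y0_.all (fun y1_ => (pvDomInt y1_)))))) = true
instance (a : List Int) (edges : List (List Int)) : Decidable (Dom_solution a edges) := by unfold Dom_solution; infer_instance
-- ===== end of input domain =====

-- B replaces A's unit-step decrement loops by the one-line closed form sum(|a_i|) - 1 guarded by sum(a) == 0 (simpler);
-- A zeroes the list a in place, B does not mutate it: the equivalence proved here is about the return value only.

-- ===== PORT A =====
-- A's inner 'while a[i] != 0 and visited[i] == False' loop, on the state (a[i], visited[i], result)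
def solWhile (x : Int) (vis : Bool) (result : Int) : Int × Int :=
  if x ≠ 0 ∧ vis = false then
    if x > 0 then solWhile (x - 1) vis (result + 1)
    else solWhile (x + 1) vis (result + 1)
  else (x, result)
termination_by x.natAbs
decreasing_by all_goals omega

-- a[i] and visited[i] are always in range here (i ∈ range(len(a))), so the .getD defaults are never used
def solution (a : List Int) (edges : List (List Int)) : Int :=
  if a.sum ≠ 0 then -1
  else
    let st := (PySem.List.pyRange 0 a.length 1).foldl
      (fun (st : List Int × List Bool × Int) (i : Int) =>
        let p := solWhile ((PySem.List.pyGet? st.1 i).getD 0)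
                          ((PySem.List.pyGet? st.2.1 i).getD false) st.2.2
        (st.1.set i.toNat p.1, st.2.1.set i.toNat true, p.2))
      (a, List.replicate a.length false, -1)
    st.2.2

-- ===== PORT B =====
def solution_alt (a : List Int) (edges : List (List Int)) : Int :=
  if a.sum = 0 then (a.map (fun x => |x|)).sum - 1 else -1

-- ===== PRECONDITION & SPEC =====
def Spec_solution (a : List Int) (edges : List (List Int)) (out : Int) : Prop := out = solution_alt a edges
instance (a : List Int) (edges : List (List Int)) (out : Int) : Decidable (Spec_solution a edges out) := by unfold Spec_solution; infer_instance

-- ===== CLAIM (what is proved, stated in full; the proofs are below) =====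
def Claim_equal_solution : Prop := ∀ (a : List Int) (edges : List (List Int)), Dom_solution a edges → Spec_solution a edges (solution a edges)

-- ===== LEMMAS AND PROOFS =====

-- A's inner while loop zeroes x and adds |x| to result
theorem solWhile_spec' : ∀ (n : Nat) (x r : Int), x.natAbs = n → solWhile x false r = (0, r + |x|) := by
  intro n
  induction n with
  | zero =>
    intro x r hx
    have : x = 0 := by omega
    subst this
    rw [solWhile]; simp
  | succ n ih =>
    intro x r hx
    have hx0 : x ≠ 0 := by omega
    rw [solWhile, if_pos ⟨hx0, rfl⟩]
    by_cases hp : x > 0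
    · rw [if_pos hp, ih (x - 1) (r + 1) (by omega)]
      rw [abs_of_pos hp, abs_of_nonneg (by omega : (0:Int) ≤ x - 1)]
      congr 1; ring
    · rw [if_neg hp, ih (x + 1) (r + 1) (by omega)]
      have hn : x < 0 := by omega
      rw [abs_of_neg hn, abs_of_nonpos (by omega : x + 1 ≤ 0)]
      congr 1; ring

theorem solWhile_spec (x r : Int) : solWhile x false r = (0, r + |x|) :=
  solWhile_spec' x.natAbs x r rfl

-- invariant of A's for-loop: processing indices [j, len a) adds the |·|-sum of the unprocessed tail to result
theorem fold_spec (rest : List Int) : ∀ (a : List Int) (vis : List Bool) (j r : Int),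
    0 ≤ j → a.drop j.toNat = rest → vis.length = a.length → j + rest.length = a.length →
    (∀ k : Nat, j.toNat ≤ k → k < vis.length → vis[k]? = some false) →
    ((PySem.List.pyRange j a.length 1).foldl
      (fun (st : List Int × List Bool × Int) (i : Int) =>
        let p := solWhile ((PySem.List.pyGet? st.1 i).getD 0)
                          ((PySem.List.pyGet? st.2.1 i).getD false) st.2.2
        (st.1.set i.toNat p.1, st.2.1.set i.toNat true, p.2))
      (a, vis, r)).2.2 = r + (rest.map (fun x => |x|)).sum := by
  induction rest with
  | nil =>
    intro a vis j r hj hdrop hlen hsum hvis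
    have : (j : Int) = a.length := by simpa using hsum
    rw [← this]
    simp
  | cons x rest' ih =>
    intro a vis j r hj hdrop hlen hsum hvis
    have hjn : j < (a.length : Int) := by simp at hsum ⊢; omega
    rw [PySem.List.pyRange_one_cons hjn]
    rw [List.foldl_cons]
    simp only
    have hga : PySem.List.pyGet? a j = some x := by
      rw [PySem.List.pyGet?_of_nonneg _ hj]
      have h0 : (a.drop j.toNat)[0]? = a[j.toNat + 0]? := List.getElem?_drop
      rw [hdrop] at h0
      simpa using h0.symm
    have hjlt : j.toNat < a.length := by omega
    have hgv : PySem.List.pyGet? vis j = some false := by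
      rw [PySem.List.pyGet?_of_nonneg _ hj]
      exact hvis j.toNat le_rfl (by omega)
    rw [hga, hgv]
    simp only [Option.getD_some]
    rw [solWhile_spec]
    have hlen' : (a.set j.toNat 0).length = a.length := by simp
    have := ih (a.set j.toNat 0) (vis.set j.toNat true) (j + 1) (r + |x|)
      (by omega)
      (by
        rw [List.drop_set]
        have h1 : a.drop (j + 1).toNat = rest' := by
          have : (j + 1).toNat = j.toNat + 1 := by omega
          rw [this, ← List.drop_drop]
          rw [hdrop]; rfl
        simp only [h1]
        split <;> [rfl; (rename_i hc; omega)])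
      (by simp [hlen])
      (by simp at hsum ⊢; omega)
      (by
        intro k hk hk2
        rw [List.getElem?_set_ne (by omega)]
        exact hvis k (by omega) (by simpa using hk2))
    rw [hlen'] at this
    rw [this]
    simp; ring

-- ===== VERDICT (by name: the statement is the Claim_ definition above) =====
theorem solution_spec : Claim_equal_solution := by
  intro a edges _
  unfold Spec_solution solution solution_alt
  by_cases h : a.sum = 0
  · rw [if_neg (by omega : ¬ a.sum ≠ 0), if_pos h]
    simp only
    rw [fold_spec a a (List.replicate a.length false) 0 (-1) le_rfl (by simp) (by simp)
        (by simp) (fun k _ hk => by simp at hk; simp [hk])]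
    ring
  · rw [if_pos h, if_neg h]
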